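-- pv_equiv track=rewrite | github.com/hyunlord/extract_logic | scripts/extractors/trait_data.py | _find_trait_file
-- ===== SOURCE A (Python) =====
-- from typing import Any
--
-- TRAIT_SOURCE_PATH = "data/species/human/personality/trait_definitions.json"
--
-- def _find_manifest_file(
--     entries: list[dict[str, Any]],
--     preferred_path: str,
--     contains: str,
-- ) -> str | None:
--     normalized_preferred = preferred_path.replace("\\", "/")
--     candidates: list[str] = []
--
--     for entry in entries:
--         rel_path = entry.get("file")
--         if not isinstance(rel_path, str) or not rel_path:
--             continue
--         normalized = rel_path.replace("\\", "/")
--         if normalized == normalized_preferred: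
--             return normalized
--         if contains in normalized:
--             candidates.append(normalized)
--
--     return candidates[0] if candidates else None
--
-- def _find_trait_file(entries: list[dict[str, Any]]) -> str | None:
--     path = _find_manifest_file(
--         entries=entries,
--         preferred_path=TRAIT_SOURCE_PATH,
--         contains="trait_definitions",
--     )
--     if path is None:
--         return None
--     if path.endswith("trait_definitions.json"):
--         return path
--
--     for entry in entries:
--         rel_path = entry.get("file")
--         if not isinstance(rel_path, str):
--             continue
--         normalized = rel_path.replace("\\", "/")
--         if "trait_definitions" in normalized and normalized.endswith(".json"):
--             return normalized
--     return path
-- ===== SOURCE B (Python) =====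
-- from typing import Any
--
-- TRAIT_SOURCE_PATH = "data/species/human/personality/trait_definitions.json"
--
--
-- def _find_trait_file(entries: list[dict[str, Any]]) -> str | None:
--     """Single pass: return the preferred path immediately; otherwise remember the
--     first 'trait_definitions' path and the first such path ending in '.json'."""
--     preferred = TRAIT_SOURCE_PATH.replace("\\", "/")
--     first_candidate = None
--     first_json = None
--     for entry in entries:
--         rel_path = entry.get("file")
--         if not isinstance(rel_path, str) or not rel_path:
--             continue
--         normalized = rel_path.replace("\\", "/")
--         if normalized == preferred:
--             return normalized
--         if "trait_definitions" in normalized: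
--             if first_candidate is None:
--                 first_candidate = normalized
--             if first_json is None and normalized.endswith(".json"):
--                 first_json = normalized
--     if first_candidate is None:
--         return None
--     if first_candidate.endswith("trait_definitions.json"):
--         return first_candidate
--     return first_json if first_json is not None else first_candidate
-- ===== Notes on version B (the rewrite author's own statement) =====
-- stated objective: simpler
-- what changed: Inlined the _find_manifest_file helper and fused A's candidate-collecting scan plus its separate fallback rescan into one linear pass that tracks the first 'trait_definitions' path and the first such '.json' path.
import Mathlib
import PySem

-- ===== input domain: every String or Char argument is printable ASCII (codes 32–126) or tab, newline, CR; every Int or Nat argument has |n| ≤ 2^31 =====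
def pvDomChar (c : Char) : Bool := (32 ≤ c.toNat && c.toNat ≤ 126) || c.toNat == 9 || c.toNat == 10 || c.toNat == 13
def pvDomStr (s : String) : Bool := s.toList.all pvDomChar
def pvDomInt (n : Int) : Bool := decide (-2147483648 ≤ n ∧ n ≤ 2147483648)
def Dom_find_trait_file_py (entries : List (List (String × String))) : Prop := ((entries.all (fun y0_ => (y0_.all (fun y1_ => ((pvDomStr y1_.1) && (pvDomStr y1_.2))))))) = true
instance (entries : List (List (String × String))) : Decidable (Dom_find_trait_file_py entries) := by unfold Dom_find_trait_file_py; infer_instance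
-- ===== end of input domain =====

-- B collapses A's helper scan plus its fallback rescan into one linear pass (objective: simpler decomposition; same O(n) cost).

-- ===== PORT A =====
def traitSourcePath : String := "data/species/human/personality/trait_definitions.json"

-- first loop of _find_manifest_file: early return on the preferred path, else collect candidates; base = candidates[0] if candidates else None
def manifestLoop (pref contains : String) : List (List (String × String)) → List String → Option String
  | [], cands => cands.head?
  | e :: rest, cands =>
    match (PySem.Dict.ofList e).get? "file" with
    | none => manifestLoop pref contains rest cands
    | some rel =>
      if rel = "" then manifestLoop pref contains rest cands
      else
        let n := PySem.Str.replace rel "\\" "/"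
        if n = pref then some n
        else if PySem.Str.isIn contains n then manifestLoop pref contains rest (cands ++ [n])
        else manifestLoop pref contains rest cands

-- A's second (fallback) loop: first normalized path containing 'trait_definitions' and ending in '.json'
def secondLoop : List (List (String × String)) → Option String
  | [] => none
  | e :: rest =>
    match (PySem.Dict.ofList e).get? "file" with
    | none => secondLoop rest
    | some rel =>
      let n := PySem.Str.replace rel "\\" "/"
      if PySem.Str.isIn "trait_definitions" n && PySem.Str.endswith n ".json" then some n
      else secondLoop rest

def find_trait_file_py (entries : List (List (String × String))) : Option String :=
  match manifestLoop (PySem.Str.replace traitSourcePath "\\" "/") "trait_definitions" entries [] with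
  | none => none
  | some path =>
    if PySem.Str.endswith path "trait_definitions.json" then some path
    else
      match secondLoop entries with
      | some n => some n
      | none => some path

-- ===== PORT B =====
-- single pass carrying (first_candidate, first_json)
def altLoop (pref : String) : List (List (String × String)) → Option String → Option String → Option String
  | [], cand, js =>
    match cand with
    | none => none
    | some c =>
      if PySem.Str.endswith c "trait_definitions.json" then some c
      else match js with
           | some j => some j
           | none => some c
  | e :: rest, cand, js =>
    match (PySem.Dict.ofList e).get? "file" with
    | none => altLoop pref rest cand js
    | some rel =>
      if rel = "" then altLoop pref rest cand js
      else
        let n := PySem.Str.replace rel "\\" "/"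
        if n = pref then some n
        else if PySem.Str.isIn "trait_definitions" n then
          altLoop pref rest (if cand.isNone then some n else cand)
            (if js.isNone && PySem.Str.endswith n ".json" then some n else js)
        else altLoop pref rest cand js

def find_trait_file_py_alt (entries : List (List (String × String))) : Option String :=
  altLoop (PySem.Str.replace traitSourcePath "\\" "/") entries none none

-- ===== PRECONDITION & SPEC =====
def Spec_find_trait_file_py (entries : List (List (String × String))) (out : Option String) : Prop := out = find_trait_file_py_alt entries
instance (entries : List (List (String × String))) (out : Option String) : Decidable (Spec_find_trait_file_py entries out) := by unfold Spec_find_trait_file_py; infer_instance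

-- ===== CLAIM (what is proved, stated in full; the proofs are below) =====
def Claim_equal_find_trait_file_py : Prop := ∀ (entries : List (List (String × String))), Dom_find_trait_file_py entries → Spec_find_trait_file_py entries (find_trait_file_py entries)

-- ===== LEMMAS AND PROOFS =====

-- A's overall computation, generalized over the already-collected candidates:
-- the fallback scan over the processed prefix contributes the first '.json' candidate already in `cands`.
def afin (pref : String) (entries : List (List (String × String))) (cands : List String) : Option String :=
  match manifestLoop pref "trait_definitions" entries cands with
  | none => none
  | some path =>
    if PySem.Str.endswith path "trait_definitions.json" then some path
    else
      match ((cands.filter (fun c => PySem.Str.endswith c ".json")).head?).or (secondLoop entries) with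
      | some n => some n
      | none => some path

lemma pref_ends : PySem.Str.endswith (PySem.Str.replace traitSourcePath "\\" "/") "trait_definitions.json" = true := by decide

lemma empty_not_in : PySem.Str.isIn "trait_definitions" (PySem.Str.replace "" "\\" "/") = false := by decide

lemma or_if_step (x : Option String) (b : Bool) (n : String) (y : Option String) :
    x.or (if b then some n else y) = (x.or (if b then some n else none)).or y := by
  cases b <;> cases x <;> simp

lemma or_if_eq_ite (x : Option String) (b : Bool) (n : String) :
    x.or (if b then some n else none) = if x.isNone && b then some n else x := by
  cases b <;> cases x <;> simp

lemma head?_append_singleton (cands : List String) (n : String) :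
    (cands ++ [n]).head? = (if cands.head?.isNone then some n else cands.head?) := by
  cases cands <;> simp

lemma filter_head_append (cands : List String) (n : String) (p : String → Bool) :
    ((cands ++ [n]).filter p).head? = (cands.filter p).head?.or (if p n then some n else none) := by
  cases h : p n <;> simp [List.filter_append, h, List.head?_append]

lemma afin_eq_altLoop (entries : List (List (String × String))) (cands : List String) :
    afin (PySem.Str.replace traitSourcePath "\\" "/") entries cands
      = altLoop (PySem.Str.replace traitSourcePath "\\" "/") entries cands.head?
          ((cands.filter (fun c => PySem.Str.endswith c ".json")).head?) := by
  induction entries generalizing cands with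
  | nil =>
    cases cands with
    | nil => rfl
    | cons c t =>
      simp only [afin, manifestLoop, secondLoop, altLoop, List.head?, Option.or_none]
  | cons e rest ih =>
    have ih' := ih
    simp only [afin] at ih'
    cases hget : (PySem.Dict.ofList e).get? "file" with
    | none =>
      simp only [afin, manifestLoop, secondLoop, altLoop, hget]
      exact ih' cands
    | some rel =>
      by_cases hempty : rel = ""
      · subst hempty
        simp only [afin, manifestLoop, secondLoop, altLoop, hget, empty_not_in,
          Bool.false_and, Bool.false_eq_true, if_false]
        exact ih' cands
      · by_cases hpref : PySem.Str.replace rel "\\" "/" = PySem.Str.replace traitSourcePath "\\" "/"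
        · simp only [afin, manifestLoop, altLoop, hget, if_neg hempty, hpref, if_true, pref_ends]
        · by_cases hin : PySem.Str.isIn "trait_definitions" (PySem.Str.replace rel "\\" "/") = true
          · have key := ih' (cands ++ [PySem.Str.replace rel "\\" "/"])
            simp only [filter_head_append, head?_append_singleton] at key
            simp only [or_if_eq_ite] at key
            simp only [afin, manifestLoop, secondLoop, altLoop, hget, if_neg hempty,
              if_neg hpref, hin, if_true, Bool.true_and]
            rw [or_if_step, or_if_eq_ite]
            exact key
          · simp only [Bool.not_eq_true] at hin
            simp only [afin, manifestLoop, secondLoop, altLoop, hget, if_neg hempty,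
              if_neg hpref, hin, Bool.false_and, Bool.false_eq_true, if_false]
            exact ih' cands

-- ===== VERDICT (by name: the statement is the Claim_ definition above) =====
theorem find_trait_file_py_spec : Claim_equal_find_trait_file_py := by
  intro entries _
  show find_trait_file_py entries = find_trait_file_py_alt entries
  have h := afin_eq_altLoop entries []
  simpa [afin, find_trait_file_py, find_trait_file_py_alt, Option.none_or] using h
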